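-- pv_equiv track=rewrite | github.com/jlista/Advent-of-Code-2024 | day21.py | split_code_segments
-- ===== SOURCE A (Python) =====
-- def split_code_segments(code):
--     code_segments = []
--     index = 0
--     start_index = 0
--     found_a = False
--     while True:
--         if index == len(code):
--             code_segments.append(code[start_index:index])
--             break
--         c = code[index]
--         if c == "A":
--             found_a = True
--         if found_a and c != "A":
--             code_segments.append(code[start_index:index])
--             start_index = index
--             found_a = False
--         index += 1
--     return code_segments
-- ===== SOURCE B (Python) =====
-- def split_code_segments(code):
--     bounds = [0] + [i for i in range(1, len(code)) if code[i] != 'A' and code[i-1] == 'A'] + [len(code)]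
--     return [code[bounds[j]:bounds[j+1]] for j in range(len(bounds)-1)]
-- ===== Notes on version B (the rewrite author's own statement) =====
-- stated objective: idiomatic
-- what changed: Replaced A's single stateful while-loop (found_a/start_index bookkeeping) with a two-phase decomposition: first compute the list of cut positions by a local two-character test, then slice the string between consecutive bounds.
import Mathlib
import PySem

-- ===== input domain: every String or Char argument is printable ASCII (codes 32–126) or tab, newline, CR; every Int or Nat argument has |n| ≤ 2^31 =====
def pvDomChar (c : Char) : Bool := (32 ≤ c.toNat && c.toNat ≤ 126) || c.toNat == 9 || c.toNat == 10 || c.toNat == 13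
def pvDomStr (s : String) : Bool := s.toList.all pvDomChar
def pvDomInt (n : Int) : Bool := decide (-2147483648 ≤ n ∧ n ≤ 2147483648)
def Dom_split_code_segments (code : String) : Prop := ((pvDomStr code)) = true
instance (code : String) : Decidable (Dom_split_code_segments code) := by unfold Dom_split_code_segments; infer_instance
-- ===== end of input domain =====

-- B replaces A's stateful single scan by "compute all cut positions, then slice between consecutive bounds" (idiomatic two-phase decomposition; same O(n) cost).

-- ===== PORT A =====
-- A's 'while True' loop; fuel = number of remaining iterations + 1 (the loop runs exactly len+1 times), only to make the recursion total
def splitLoopA (cs : List Char) (fuel : Nat) (index start : Nat) (found : Bool) (acc : List String) : List String :=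
  match fuel with
  | 0 => acc
  | fuel + 1 =>
    if index = cs.length then
      acc ++ [String.ofList (PySem.List.slice cs (some (start : Int)) (some (index : Int)))]
    else
      let c := PySem.List.pyGetD cs (index : Int) ' '
      let found_a := if c == 'A' then true else found
      if found_a && !(c == 'A') then
        splitLoopA cs fuel (index + 1) index false
          (acc ++ [String.ofList (PySem.List.slice cs (some (start : Int)) (some (index : Int)))])
      else
        splitLoopA cs fuel (index + 1) start found_a acc

def split_code_segments (code : String) : List String :=
  splitLoopA code.toList (code.toList.length + 1) 0 0 false []

-- ===== PORT B =====
def split_code_segments_alt (code : String) : List String :=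
  let cs := code.toList
  let n : Int := cs.length
  let bounds : List Int :=
    [0] ++ (PySem.List.pyRange 1 n 1).filter
      (fun i => PySem.List.pyGetD cs i ' ' != 'A' && PySem.List.pyGetD cs (i - 1) ' ' == 'A') ++ [n]
  (PySem.List.pyRange 0 ((bounds.length : Int) - 1) 1).map
    (fun j => String.ofList (PySem.List.slice cs (some (PySem.List.pyGetD bounds j 0))
                                            (some (PySem.List.pyGetD bounds (j + 1) 0))))

-- ===== PRECONDITION & SPEC =====
def Spec_split_code_segments (code : String) (out : List String) : Prop := out = split_code_segments_alt code
instance (code : String) (out : List String) : Decidable (Spec_split_code_segments code out) := by unfold Spec_split_code_segments; infer_instance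

-- ===== CLAIM (what is proved, stated in full; the proofs are below) =====
def Claim_equal_split_code_segments : Prop := ∀ (code : String), Dom_split_code_segments code → Spec_split_code_segments code (split_code_segments code)

-- ===== LEMMAS AND PROOFS =====

-- map a function over consecutive pairs of a list
def pairsMap (f : Int → Int → String) : List Int → List String
  | a :: b :: t => f a b :: pairsMap f (b :: t)
  | _ => []

-- the cut positions ≥ i, as Ints; called with fuel = cs.length - i
def cutsFrom (cs : List Char) : Nat → Nat → List Int
  | 0, _ => []
  | fuel + 1, i =>
    (if 0 < i ∧ cs.getD i ' ' ≠ 'A' ∧ cs.getD (i - 1) ' ' = 'A' then [(i : Int)] else [])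
      ++ cutsFrom cs fuel (i + 1)

theorem splitLoopA_eq (cs : List Char) (fuel i start : Nat) (found : Bool) (acc : List String)
    (hs : start ≤ i) (hi : i ≤ cs.length) (hf : fuel = cs.length + 1 - i)
    (hfound : found = decide (0 < i ∧ cs.getD (i - 1) ' ' = 'A')) :
    splitLoopA cs fuel i start found acc =
      acc ++ pairsMap (fun a b => String.ofList (PySem.List.slice cs (some a) (some b)))
        ((start : Int) :: cutsFrom cs (cs.length - i) i ++ [(cs.length : Int)]) := by
  induction fuel generalizing i start found acc with
  | zero => omega
  | succ fuel ih =>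
    rw [splitLoopA]
    by_cases hieq : i = cs.length
    · subst hieq
      rw [if_pos rfl]
      simp [cutsFrom, pairsMap]
    · have hilt : i < cs.length := by omega
      simp only [if_neg hieq]
      have hget : PySem.List.pyGetD cs (i : Int) ' ' = cs.getD i ' ' := PySem.List.pyGetD_natCast cs i ' '
      have hcf : cs.length - i = (cs.length - (i + 1)) + 1 := by omega
      by_cases hcut : found = true ∧ cs.getD i ' ' ≠ 'A'
      · -- the cut branch is taken
        have hcond : ((if PySem.List.pyGetD cs (i : Int) ' ' == 'A' then true else found) &&
            !(PySem.List.pyGetD cs (i : Int) ' ' == 'A')) = true := by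
          rw [hget]
          rcases hcut with ⟨hf, hne⟩
          have hAf : (cs[i]?.getD ' ' == 'A') = false := by simpa using hne
          simp [hf, hAf]
        rw [if_pos hcond]
        have hfound' : found = true := hcut.1
        rw [hfound'] at hfound
        have hcond2 : 0 < i ∧ cs.getD (i - 1) ' ' = 'A' := by
          have := (decide_eq_true_iff).mp hfound.symm
          exact this
        have hpred : (0 < i ∧ cs.getD i ' ' ≠ 'A' ∧ cs.getD (i - 1) ' ' = 'A') :=
          ⟨hcond2.1, hcut.2, hcond2.2⟩
        rw [hcf]
        rw [show cutsFrom cs ((cs.length - (i + 1)) + 1) i =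
            [(i : Int)] ++ cutsFrom cs (cs.length - (i + 1)) (i + 1) by
          rw [cutsFrom, if_pos hpred]]
        rw [ih (i + 1) i false _ (by omega) (by omega) (by omega) ?_]
        · simp [pairsMap]
        · have h2 : ¬ cs[i]?.getD ' ' = 'A' := by simpa using hcut.2
          simp [h2]
      · -- no cut
        have hcond : ((if PySem.List.pyGetD cs (i : Int) ' ' == 'A' then true else found) &&
            !(PySem.List.pyGetD cs (i : Int) ' ' == 'A')) = false := by
          rw [hget]
          by_cases hA : cs.getD i ' ' = 'A'
          · have hAt : (cs[i]?.getD ' ' == 'A') = true := by simpa using hA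
            simp [hAt]
          · have hf : found = false := by
              cases hfd : found
              · rfl
              · exact absurd ⟨hfd, hA⟩ hcut
            have hAf : (cs[i]?.getD ' ' == 'A') = false := by simpa using hA
            simp [hAf, hf]
        rw [if_neg (by rw [hcond]; simp)]
        have hpred : ¬ (0 < i ∧ cs.getD i ' ' ≠ 'A' ∧ cs.getD (i - 1) ' ' = 'A') := by
          intro ⟨h1, h2, h3⟩
          have : found = true := by
            rw [hfound]; simp; exact ⟨h1, h3⟩
          exact hcut ⟨this, h2⟩
        rw [hcf]
        rw [show cutsFrom cs ((cs.length - (i + 1)) + 1) i =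
            cutsFrom cs (cs.length - (i + 1)) (i + 1) by
          rw [cutsFrom, if_neg hpred]; simp]
        rw [ih (i + 1) start _ acc (by omega) (by omega) (by omega) ?_]
        rw [hget]
        by_cases hA : cs.getD i ' ' = 'A'
        · have h2 : cs[i]?.getD ' ' = 'A' := by simpa using hA
          simp [h2]
        · have hf : found = false := by
            cases hfd : found
            · rfl
            · exact absurd ⟨hfd, hA⟩ hcut
          have hAf : (cs[i]?.getD ' ' == 'A') = false := by simpa using hA
          have h2 : ¬ cs[i]?.getD ' ' = 'A' := by simpa using hA
          simp [hAf, hf, h2]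

theorem filter_eq_cutsFrom (cs : List Char) (fuel i : Nat) (h1 : 1 ≤ i) (hi : i ≤ cs.length)
    (hf : fuel = cs.length - i) :
    (PySem.List.pyRange (i : Int) (cs.length : Int) 1).filter
      (fun j => PySem.List.pyGetD cs j ' ' != 'A' && PySem.List.pyGetD cs (j - 1) ' ' == 'A')
      = cutsFrom cs fuel i := by
  induction fuel generalizing i with
  | zero =>
    rw [PySem.List.pyRange_one_eq_nil (by omega : (cs.length : Int) ≤ (i : Int))]
    simp [cutsFrom]
  | succ fuel ih =>
    have hilt : i < cs.length := by omega
    rw [PySem.List.pyRange_one_cons (by omega : (i : Int) < (cs.length : Int))]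
    rw [List.filter_cons]
    have hsub : (i : Int) - 1 = ((i - 1 : Nat) : Int) := by omega
    have hbody : (PySem.List.pyGetD cs (i : Int) ' ' != 'A' &&
        PySem.List.pyGetD cs ((i : Int) - 1) ' ' == 'A')
        = decide (0 < i ∧ cs.getD i ' ' ≠ 'A' ∧ cs.getD (i - 1) ' ' = 'A') := by
      rw [hsub, PySem.List.pyGetD_natCast, PySem.List.pyGetD_natCast]
      have h1i : 0 < i := by omega
      by_cases hA : cs[i]?.getD ' ' = 'A' <;> by_cases hB : cs[i - 1]?.getD ' ' = 'A' <;>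
        simp [List.getD, hA, hB, h1i]
    rw [hbody]
    have hstep : (i : Int) + 1 = ((i + 1 : Nat) : Int) := by omega
    rw [hstep, ih (i + 1) (by omega) (by omega) (by omega)]
    by_cases hp : 0 < i ∧ cs.getD i ' ' ≠ 'A' ∧ cs.getD (i - 1) ' ' = 'A'
    · rw [if_pos (by simpa using hp)]
      rw [cutsFrom, if_pos hp]
      simp
    · rw [if_neg (by simpa using hp)]
      rw [cutsFrom, if_neg hp]
      simp

theorem filter_eq_cutsFrom_zero (cs : List Char) :
    (PySem.List.pyRange 1 (cs.length : Int) 1).filter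
      (fun j => PySem.List.pyGetD cs j ' ' != 'A' && PySem.List.pyGetD cs (j - 1) ' ' == 'A')
      = cutsFrom cs cs.length 0 := by
  match h : cs.length with
  | 0 =>
    rw [PySem.List.pyRange_one_eq_nil (by simp : ((0 : Nat) : Int) ≤ (1 : Int))]
    simp [cutsFrom]
  | m + 1 =>
    have h0 : cutsFrom cs (m + 1) 0 = cutsFrom cs m 1 := by
      rw [cutsFrom]
      simp
    rw [h0]
    have hh := filter_eq_cutsFrom cs m 1 (by omega) (by omega) (by omega)
    rw [h] at hh
    simpa using hh

theorem natRange_getD_pairs (f : Int → Int → String) (l : List Int) :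
    (List.range (l.length - 1)).map (fun k => f (l.getD k 0) (l.getD (k + 1) 0)) = pairsMap f l := by
  induction l with
  | nil => simp [pairsMap]
  | cons a l ih =>
    match l with
    | [] => simp [pairsMap]
    | b :: t =>
      have step : (List.range ((a :: b :: t).length - 1)).map
          (fun k => f ((a :: b :: t).getD k 0) ((a :: b :: t).getD (k + 1) 0))
          = f a b :: (List.range ((b :: t).length - 1)).map
              (fun k => f ((b :: t).getD k 0) ((b :: t).getD (k + 1) 0)) := by
        rw [show (a :: b :: t).length - 1 = (b :: t).length - 1 + 1 by simp,
          List.range_succ_eq_map, List.map_cons, List.map_map]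
        simp [Function.comp_def]
      rw [step, ih]
      simp [pairsMap]

theorem range_getD_pairs (f : Int → Int → String) (l : List Int) :
    (PySem.List.pyRange 0 ((l.length : Int) - 1) 1).map
      (fun j => f (PySem.List.pyGetD l j 0) (PySem.List.pyGetD l (j + 1) 0)) = pairsMap f l := by
  match l with
  | [] => simp [PySem.List.pyRange_one_eq_nil, pairsMap]
  | x :: l' =>
    rw [show ((x :: l').length : Int) - 1 = ((l'.length : Nat) : Int) by simp,
      PySem.List.pyRange_zero_natCast, List.map_map]
    rw [← natRange_getD_pairs f (x :: l')]
    apply List.map_congr_left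
    intro k hk
    simp only [Function.comp_def]
    have h2 : ((k : Nat) : Int) + 1 = (((k + 1) : Nat) : Int) := by push_cast; ring
    rw [h2, PySem.List.pyGetD_natCast, PySem.List.pyGetD_natCast]

-- ===== VERDICT (by name: the statement is the Claim_ definition above) =====
theorem split_code_segments_spec : Claim_equal_split_code_segments := by
  intro code _
  unfold Spec_split_code_segments split_code_segments split_code_segments_alt
  rw [splitLoopA_eq code.toList _ 0 0 false [] (by omega) (by omega) (by omega) (by simp)]
  dsimp only
  rw [range_getD_pairs (fun a b => String.ofList (PySem.List.slice code.toList (some a) (some b)))]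
  rw [filter_eq_cutsFrom_zero]
  simp
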